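-- pv_equiv track=rewrite | github.com/bestfitroa/BinPackROA | BF_code.py | convert
-- ===== SOURCE A (Python) =====
-- from functools import cmp_to_key
-- import copy
--
-- def compare(bin1, bin2):                      # custom comparator for bins, so as to sort bin configurations in decreasing order of load.
--     return -sum(bin1) + sum(bin2)
--
-- def convert(config,L):                          # describing the bin configuration collection (an array of arrays, i.e., a collection of open bins) in terms of item counts
--     n = len(config)
--     config1 = copy.deepcopy(config)
--     config1.sort(key=cmp_to_key(compare))
--     arr = []
--     for i in range(n):
--         arr1 = [0]*len(L)
--         for j in range(len(L)):
--             arr1[j] = config1[i].count(L[j])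
--         arr.append(arr1)
--     return (n,arr)
-- ===== SOURCE B (Python) =====
-- def convert(config, L):
--     # Scatter instead of gather: one global map value -> all column indices in L
--     # (handles duplicates in L), then one pass over each bin's items incrementing
--     # the listed columns; the inner scan over L per column disappears.
--     pos = {}
--     for j, v in enumerate(L):
--         pos.setdefault(v, []).append(j)
--     rows = []
--     for b in sorted(config, key=lambda bin_: -sum(bin_)):
--         row = [0] * len(L)
--         for x in b:
--             for j in pos.get(x, ()):
--                 row[j] += 1
--         rows.append(row)
--     return (len(config), rows)
-- ===== Notes on version B (the rewrite author's own statement) =====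
-- stated objective: alternative
-- what changed: B inverts the traversal: instead of sorting a deepcopy via cmp_to_key and scanning each bin once per column of L (gather via .count), it builds one global map from value to all column indices of L, uses a stable key sort, and fills each row in a single scatter pass over the bin's items, incrementing the mapped columns; this removes the per-column inner scan (O(k*m) per bin becomes O(m+k)), though the harness could not time it here.
import Mathlib
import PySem

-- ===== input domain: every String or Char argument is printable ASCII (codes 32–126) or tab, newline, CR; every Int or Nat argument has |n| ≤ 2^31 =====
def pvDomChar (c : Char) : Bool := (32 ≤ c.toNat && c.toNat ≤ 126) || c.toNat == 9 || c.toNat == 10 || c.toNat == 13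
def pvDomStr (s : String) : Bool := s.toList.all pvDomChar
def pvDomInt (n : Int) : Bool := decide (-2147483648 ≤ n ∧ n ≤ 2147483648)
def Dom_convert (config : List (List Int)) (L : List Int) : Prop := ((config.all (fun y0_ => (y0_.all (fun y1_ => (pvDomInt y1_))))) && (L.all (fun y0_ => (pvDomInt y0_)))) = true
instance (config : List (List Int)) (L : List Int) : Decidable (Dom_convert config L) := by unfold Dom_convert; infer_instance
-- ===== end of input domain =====

-- B inverts the traversal: one global value→column-indices map for L plus a single
-- scatter pass over each bin's items, instead of scanning each bin once per column
-- of L (objective: alternative algorithm; removes the per-column inner scan).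

-- ===== PORT A =====
-- cmp_to_key(compare) with compare(b1,b2) = -sum(b1) + sum(b2) orders exactly by the
-- key b ↦ -sum(b) (compare(b1,b2) < 0 ⇔ -sum b1 < -sum b2), and list.sort is the same
-- stable sort; deepcopy is irrelevant to the return value (bins are only read).
def convert (config : List (List Int)) (L : List Int) : Int × List (List Int) :=
  let n : Int := config.length
  let config1 := PySem.List.sorted config (fun b => -(b.sum)) false
  let arr := config1.foldl
    (fun arr b => arr ++ [L.map (fun v => (PySem.List.count b v : Int))]) []
  (n, arr)

-- ===== PORT B =====
-- pos.setdefault(v, []).append(j) ported as Dict.modify v [] (· ++ [j]); row[j] += 1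
-- as pySetD row j (pyGetD row j 0 + 1) (indices from enumerate are always in range).
def convert_alt (config : List (List Int)) (L : List Int) : Int × List (List Int) :=
  let pos : PySem.Dict Int (List Int) :=
    (PySem.List.enumerate L 0).foldl
      (fun d jv => d.modify jv.2 [] (· ++ [jv.1])) PySem.Dict.empty
  let rows := (PySem.List.sorted config (fun bin_ => -(bin_.sum)) false).foldl
    (fun rows b =>
      let row := b.foldl
        (fun row x =>
          (pos.getD x []).foldl
            (fun row j => PySem.List.pySetD row j (PySem.List.pyGetD row j 0 + 1)) row)
        (List.replicate L.length (0 : Int))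
      rows ++ [row]) []
  ((config.length : Int), rows)

-- ===== PRECONDITION & SPEC =====
def Spec_convert (config : List (List Int)) (L : List Int) (out : Int × List (List Int)) : Prop := out = convert_alt config L
instance (config : List (List Int)) (L : List Int) (out : Int × List (List Int)) : Decidable (Spec_convert config L out) := by unfold Spec_convert; infer_instance

-- ===== CLAIM (what is proved, stated in full; the proofs are below) =====
def Claim_equal_convert : Prop := ∀ (config : List (List Int)) (L : List Int), Dom_convert config L → Spec_convert config L (convert config L)

-- ===== LEMMAS AND PROOFS =====
theorem pv_pos_getD (L : List Int) (x : Int) :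
    ((PySem.List.enumerate L 0).foldl
      (fun d jv => d.modify jv.2 [] (· ++ [jv.1])) PySem.Dict.empty).getD x []
      = ((PySem.List.enumerate L 0).filter (fun jv => jv.2 == x)).map (·.1) := by
  have h : (PySem.List.enumerate L 0).foldl
      (fun d jv => d.modify jv.2 [] (· ++ [jv.1])) PySem.Dict.empty
      = ((PySem.List.enumerate L 0).map (fun jv => (jv.2, jv.1))).foldl
        (fun d p => d.modify p.1 [] (· ++ [p.2])) PySem.Dict.empty := by
    rw [List.foldl_map]
  rw [h, PySem.Dict.getD_foldl_modify_append]
  simp [List.filter_map, List.map_map, Function.comp_def]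

theorem pv_pos_nodup (L : List Int) (x : Int) :
    (((PySem.List.enumerate L 0).filter (fun jv => jv.2 == x)).map (·.1)).Nodup := by
  have h1 : ((PySem.List.enumerate L 0).filter (fun jv => jv.2 == x)).Pairwise
      (fun p q => p.1 < q.1) := (PySem.List.pairwise_lt_enumerate L 0).filter _
  exact (List.pairwise_map.mpr h1).imp fun h => ne_of_lt h

theorem pv_pos_mem (L : List Int) (x j : Int) :
    j ∈ (((PySem.List.enumerate L 0).filter (fun jv => jv.2 == x)).map (·.1))
      ↔ ∃ (k : Nat) (h : k < L.length), j = (k : Int) ∧ L[k] = x := by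
  simp [List.mem_map, List.mem_filter, PySem.List.mem_enumerate_iff]

theorem step_getD (row : List Int) (j : Int) (k : Nat) (hj0 : 0 ≤ j) (hk : k < row.length) :
    (PySem.List.pySetD row j (PySem.List.pyGetD row j 0 + 1)).getD k 0
      = row.getD k 0 + (if (k : Int) = j then 1 else 0) := by
  have hcast : j = ((j.toNat : Nat) : Int) := (Int.toNat_of_nonneg hj0).symm
  rw [hcast, PySem.List.pySetD_natCast, PySem.List.pyGetD_natCast]
  simp only [Nat.cast_inj]
  by_cases h : k = j.toNat
  · subst h; simp [List.getD, hk]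
  · simp [List.getD, h, Ne.symm h]

theorem pv_incr_fold_length (S row : List Int) :
    (S.foldl (fun row j => PySem.List.pySetD row j (PySem.List.pyGetD row j 0 + 1)) row).length
      = row.length := by
  induction S generalizing row with
  | nil => rfl
  | cons j S ih => rw [List.foldl_cons, ih, PySem.List.length_pySetD]

theorem incr_fold_getD (S : List Int) (row : List Int) (k : Nat)
    (hS : ∀ j ∈ S, 0 ≤ j) (hk : k < row.length) :
    (S.foldl (fun row j => PySem.List.pySetD row j (PySem.List.pyGetD row j 0 + 1)) row).getD k 0
      = row.getD k 0 + (S.count (k : Int) : Int) := by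
  induction S generalizing row with
  | nil => simp
  | cons j S ih =>
    have hj0 := hS j (List.mem_cons_self ..)
    have hlen : (PySem.List.pySetD row j (PySem.List.pyGetD row j 0 + 1)).length = row.length :=
      PySem.List.length_pySetD ..
    rw [List.foldl_cons, ih _ (fun i hi => hS i (List.mem_cons_of_mem _ hi)) (hlen ▸ hk)]
    rw [step_getD row j k hj0 hk, List.count_cons]
    simp only [beq_iff_eq]
    split_ifs <;> push_cast <;> omega

theorem pv_scatter_getD (L b : List Int) (row : List Int) (k : Nat)
    (hrow : row.length = L.length) (hk : k < L.length) :
    (b.foldl (fun row x =>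
        (((PySem.List.enumerate L 0).filter (fun jv => jv.2 == x)).map (·.1)).foldl
          (fun row j => PySem.List.pySetD row j (PySem.List.pyGetD row j 0 + 1)) row) row).getD k 0
      = row.getD k 0 + (b.count (L.getD k 0) : Int) := by
  induction b generalizing row with
  | nil => simp
  | cons x b ih =>
    set P := (((PySem.List.enumerate L 0).filter (fun jv => jv.2 == x)).map (·.1)) with hP
    have hpos : ∀ j ∈ P, 0 ≤ j := by
      intro j hj
      obtain ⟨k', _, rfl, _⟩ := (pv_pos_mem L x j).mp hj
      exact Int.natCast_nonneg k'
    have hlen : (P.foldl (fun row j => PySem.List.pySetD row j (PySem.List.pyGetD row j 0 + 1)) row).length = row.length :=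
      pv_incr_fold_length ..
    rw [List.foldl_cons, ih _ (hlen.trans hrow)]
    rw [incr_fold_getD P row k hpos (hrow ▸ hk)]
    have hcnt : (P.count (k : Int)) = if x = L.getD k 0 then 1 else 0 := by
      by_cases hmem : (k : Int) ∈ P
      · obtain ⟨k', hk', hkk', hLk⟩ := (pv_pos_mem L x _).mp hmem
        have : k' = k := by exact_mod_cast hkk'.symm
        subst this
        rw [List.count_eq_one_of_mem (pv_pos_nodup L x) hmem]
        rw [List.getD_eq_getElem _ _ hk]
        simp [hLk]
      · rw [List.count_eq_zero_of_not_mem hmem]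
        have : ¬ (x = L.getD k 0) := by
          intro hx
          exact hmem ((pv_pos_mem L x _).mpr ⟨k, hk, rfl, by rw [← List.getD_eq_getElem _ 0 hk, hx]⟩)
        simpa [List.getD] using this
    rw [List.count_cons, hcnt]
    simp only [beq_iff_eq]
    split_ifs <;> push_cast <;> omega

theorem pv_scatter_length (L b row : List Int) :
    (b.foldl (fun row x =>
        (((PySem.List.enumerate L 0).filter (fun jv => jv.2 == x)).map (·.1)).foldl
          (fun row j => PySem.List.pySetD row j (PySem.List.pyGetD row j 0 + 1)) row) row).length
      = row.length := by
  induction b generalizing row with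
  | nil => rfl
  | cons x b ih => rw [List.foldl_cons, ih, pv_incr_fold_length]

theorem pv_row_eq (L b : List Int) :
    b.foldl
      (fun row x =>
        ((((PySem.List.enumerate L 0).foldl
            (fun d jv => d.modify jv.2 [] (· ++ [jv.1])) PySem.Dict.empty).getD x [])).foldl
          (fun row j => PySem.List.pySetD row j (PySem.List.pyGetD row j 0 + 1)) row)
      (List.replicate L.length (0 : Int))
      = L.map (fun v => (PySem.List.count b v : Int)) := by
  simp only [pv_pos_getD]
  apply List.ext_getElem
  · rw [pv_scatter_length]; simp
  · intro k h1 h2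
    have hk : k < L.length := by simpa using h2
    have h := pv_scatter_getD L b (List.replicate L.length (0 : Int)) k (by simp) hk
    rw [List.getD_eq_getElem _ _ h1] at h
    rw [h, List.getElem_map]
    simp [PySem.List.count_eq, List.getD, List.getElem?_eq_getElem hk]

-- ===== VERDICT (by name: the statement is the Claim_ definition above) =====
theorem convert_spec : Claim_equal_convert := by
  intro config L _
  unfold Spec_convert convert convert_alt
  simp only [PySem.List.foldl_append_singleton_eq_map, List.nil_append]
  refine Prod.ext rfl ?_
  exact List.map_congr_left (fun b _ => (pv_row_eq L b).symm)
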